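-- pv_equiv track=rewrite | github.com/Tanim-Hasan-Ovi/Cybersecurity-Projects-Hub | Phishing-URL-Detector/app.py | check_for_brand_spoofing
-- ===== SOURCE A (Python) =====
-- def check_for_brand_spoofing(url):
--     cleaned_url = url.replace("https://", "").replace("http://", "").lower()
--     hostname = cleaned_url.split('/')[0]
--
--     if hostname.startswith("www."):
--         hostname = hostname[4:]
--
--     # main domain part
--     parts = hostname.split('.')
--
--     visual_mappings = {'i': 'l', '1': 'l', '0': 'o', '8': 'b', 'q': 'g'}
--     target_brands = ['google', 'paypal', 'apple', 'facebook', 'amazon', 'microsoft', 'netflix']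
--
--     for part in parts:
--         # Step A: Check if the part is exactly a brand (Safe)
--         if part in target_brands:
--             continue
--
--         # Step B: Check if the part LOOKS like a brand
--         standardized_part = "".join(visual_mappings.get(c, c) for c in part)
--         for brand in target_brands:
--             if standardized_part == brand and part != brand:
--                 return True, brand
--
--     return False, None
-- ===== SOURCE B (Python) =====
-- VISUAL_MAPPINGS = {'i': 'l', '1': 'l', '0': 'o', '8': 'b', 'q': 'g'}
-- TARGET_BRANDS = ['google', 'paypal', 'apple', 'facebook', 'amazon', 'microsoft', 'netflix']
--
--
-- def _spoof_table():
--     # Invert the one-directional mapping: which source chars standardize to c?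
--     inverse = {}
--     for src, dst in VISUAL_MAPPINGS.items():
--         inverse.setdefault(dst, []).append(src)
--     # Every spoof string -> brand, via the per-position pre-image product.
--     # A char that is itself a mapping key has an empty pre-image.
--     spoofs = {}
--     for brand in TARGET_BRANDS:
--         variants = ['']
--         for ch in brand:
--             sources = ([ch] if ch not in VISUAL_MAPPINGS else []) + inverse.get(ch, [])
--             variants = [v + s for v in variants for s in sources]
--         for v in variants:
--             if v != brand:
--                 spoofs[v] = brand
--     return spoofs
--
--
-- SPOOFS = _spoof_table()
--
--
-- def check_for_brand_spoofing(url):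
--     hostname = url.replace("https://", "").replace("http://", "").lower().split('/')[0]
--     if hostname.startswith("www."):
--         hostname = hostname[4:]
--     for part in hostname.split('.'):
--         if part in TARGET_BRANDS:
--             continue
--         brand = SPOOFS.get(part)
--         if brand is not None:
--             return True, brand
--     return False, None
-- ===== Notes on version B (the rewrite author's own statement) =====
-- stated objective: alternative
-- what changed: A standardizes each hostname part and scans the whole brand list per part; B precomputes once a dict mapping every spoof variant of every brand (cartesian product of per-character pre-images of the visual mapping, a char that is itself a mapping key having an empty pre-image) to its brand, so each part is a single membership test plus one dict lookup.
import Mathlib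
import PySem

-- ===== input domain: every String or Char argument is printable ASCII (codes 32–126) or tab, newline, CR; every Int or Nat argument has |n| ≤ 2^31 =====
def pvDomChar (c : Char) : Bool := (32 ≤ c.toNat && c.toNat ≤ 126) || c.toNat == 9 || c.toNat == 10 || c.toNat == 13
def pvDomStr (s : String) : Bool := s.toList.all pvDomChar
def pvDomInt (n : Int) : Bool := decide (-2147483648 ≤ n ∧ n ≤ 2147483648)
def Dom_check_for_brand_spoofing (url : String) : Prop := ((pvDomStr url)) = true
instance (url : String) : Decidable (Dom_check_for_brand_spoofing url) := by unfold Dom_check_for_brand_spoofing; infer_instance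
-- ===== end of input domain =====

-- B replaces A's per-part scan over all brands (standardize, then compare with each brand)
-- by a dict mapping every spoof variant of every brand (per-position pre-image product of the
-- visual mapping) to its brand, so each part costs one membership test and one lookup.

-- constants shared by both Pythons (identical literals in both sources)
def pvVisualMappings : PySem.Dict Char Char :=
  PySem.Dict.ofList [('i','l'),('1','l'),('0','o'),('8','b'),('q','g')]
def pvTargetBrands : List (List Char) :=
  ["google","paypal","apple","facebook","amazon","microsoft","netflix"].map String.toList

-- ===== PORT A =====
-- standardized_part = "".join(visual_mappings.get(c, c) for c in part)
def pvStandardize (part : List Char) : List Char :=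
  PySem.Chars.join [] (part.map (fun c => [pvVisualMappings.getD c c]))

-- inner 'for brand in target_brands: if standardized_part == brand and part != brand: return True, brand'
def pvFindSpoof (part std : List Char) : List (List Char) → Option (List Char)
  | [] => none
  | b :: rest => if std == b && part != b then some b else pvFindSpoof part std rest

-- outer 'for part in parts'
def pvALoop : List (List Char) → Bool × Option String
  | [] => (false, none)
  | p :: rest =>
    if pvTargetBrands.contains p then pvALoop rest
    else
      match pvFindSpoof p (pvStandardize p) pvTargetBrands with
      | some b => (true, some (String.ofList b))
      | none => pvALoop rest

def check_for_brand_spoofing (url : String) : Bool × Option String :=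
  let cleaned := PySem.Chars.lower (PySem.Chars.replace
    (PySem.Chars.replace url.toList "https://".toList []) "http://".toList [])
  -- split('/')[0]: str.split with a separator never returns an empty list, so [0] never raises
  let hostname0 := (PySem.Chars.splitOn cleaned ['/']).headD []
  let hostname := if PySem.Chars.startswith hostname0 "www.".toList
    then PySem.List.slice hostname0 (some 4) none else hostname0
  pvALoop (PySem.Chars.splitOn hostname ['.'])

-- ===== PORT B =====
-- inverse = {}; for src, dst in visual_mappings.items(): inverse.setdefault(dst, []).append(src)
def pvInverse : PySem.Dict Char (List Char) :=
  pvVisualMappings.items.foldl (fun d p => d.modify p.2 [] (· ++ [p.1])) PySem.Dict.empty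

-- sources = ([ch] if ch not in visual_mappings else []) + inverse.get(ch, [])
def pvSources (c : Char) : List Char :=
  (if pvVisualMappings.contains c then [] else [c]) ++ pvInverse.getD c []

-- variants = ['']; for ch in brand: variants = [v + s for v in variants for s in sources]
def pvVariants (b : List Char) : List (List Char) :=
  b.foldl (fun vs c => vs.flatMap (fun v => (pvSources c).map (fun s => v ++ [s]))) [[]]

-- spoofs = {}; for brand: for v in variants: if v != brand: spoofs[v] = brand
def pvSpoofs : PySem.Dict (List Char) (List Char) :=
  pvTargetBrands.foldl
    (fun d b => (pvVariants b).foldl (fun d v => if v ≠ b then d.insert v b else d) d)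
    PySem.Dict.empty

-- for part in parts: if part in target_brands: continue; if part in spoofs: return True, spoofs[part]
def pvBLoop : List (List Char) → Bool × Option String
  | [] => (false, none)
  | p :: rest =>
    if pvTargetBrands.contains p then pvBLoop rest
    else
      match pvSpoofs.get? p with
      | some b => (true, some (String.ofList b))
      | none => pvBLoop rest

def check_for_brand_spoofing_alt (url : String) : Bool × Option String :=
  let cleaned := PySem.Chars.lower (PySem.Chars.replace
    (PySem.Chars.replace url.toList "https://".toList []) "http://".toList [])
  let hostname0 := (PySem.Chars.splitOn cleaned ['/']).headD []
  let hostname := if PySem.Chars.startswith hostname0 "www.".toList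
    then PySem.List.slice hostname0 (some 4) none else hostname0
  pvBLoop (PySem.Chars.splitOn hostname ['.'])

-- ===== PRECONDITION & SPEC =====
def Spec_check_for_brand_spoofing (url : String) (out : Bool × Option String) : Prop := out = check_for_brand_spoofing_alt url
instance (url : String) (out : Bool × Option String) : Decidable (Spec_check_for_brand_spoofing url out) := by unfold Spec_check_for_brand_spoofing; infer_instance

-- ===== CLAIM (what is proved, stated in full; the proofs are below) =====
def Claim_equal_check_for_brand_spoofing : Prop := ∀ (url : String), Dom_check_for_brand_spoofing url → Spec_check_for_brand_spoofing url (check_for_brand_spoofing url)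

-- ===== LEMMAS AND PROOFS =====

-- the per-char standardization A applies
def pvF (c : Char) : Char := pvVisualMappings.getD c c

lemma pvStandardize_eq_map (p : List Char) : pvStandardize p = p.map pvF := by
  have h := PySem.Chars.join_nil_singletons (p.map pvF)
  simpa [pvStandardize, pvF, List.map_map, Function.comp] using h

lemma pvVis_mk : pvVisualMappings = PySem.Dict.mk [('i','l'),('1','l'),('0','o'),('8','b'),('q','g')] := by decide

lemma pvF_eq (x : Char) : pvF x =
    if x = 'i' then 'l' else if x = '1' then 'l' else if x = '0' then 'o'
    else if x = '8' then 'b' else if x = 'q' then 'g' else x := by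
  by_cases h1 : x = 'i'; · subst h1; decide
  by_cases h2 : x = '1'; · subst h2; decide
  by_cases h3 : x = '0'; · subst h3; decide
  by_cases h4 : x = '8'; · subst h4; decide
  by_cases h5 : x = 'q'; · subst h5; decide
  have e1 : ('i' == x) = false := beq_eq_false_iff_ne.mpr (fun h => h1 h.symm)
  have e2 : ('1' == x) = false := beq_eq_false_iff_ne.mpr (fun h => h2 h.symm)
  have e3 : ('0' == x) = false := beq_eq_false_iff_ne.mpr (fun h => h3 h.symm)
  have e4 : ('8' == x) = false := beq_eq_false_iff_ne.mpr (fun h => h4 h.symm)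
  have e5 : ('q' == x) = false := beq_eq_false_iff_ne.mpr (fun h => h5 h.symm)
  simp only [pvF, pvVis_mk, PySem.Dict.getD_eq_get?_getD, PySem.Dict.get?_mk_cons,
    e1, e2, e3, e4, e5, Bool.false_eq_true, if_false, if_neg h1, if_neg h2, if_neg h3,
    if_neg h4, if_neg h5]
  rfl

lemma mem_pvSources_of (c x : Char) (h : pvF x = c) : x ∈ pvSources c := by
  rw [pvF_eq] at h
  split_ifs at h with h1 h2 h3 h4 h5
  · subst h1; subst h; decide
  · subst h2; subst h; decide
  · subst h3; subst h; decide
  · subst h4; subst h; decide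
  · subst h5; subst h; decide
  · -- x is not a key of the mapping, so pvF x = x and x itself is a source for x
    subst h
    have e1 : ('i' == x) = false := beq_eq_false_iff_ne.mpr (fun h => h1 h.symm)
    have e2 : ('1' == x) = false := beq_eq_false_iff_ne.mpr (fun h => h2 h.symm)
    have e3 : ('0' == x) = false := beq_eq_false_iff_ne.mpr (fun h => h3 h.symm)
    have e4 : ('8' == x) = false := beq_eq_false_iff_ne.mpr (fun h => h4 h.symm)
    have e5 : ('q' == x) = false := beq_eq_false_iff_ne.mpr (fun h => h5 h.symm)
    have hc : pvVisualMappings.contains x = false := by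
      simp [pvVis_mk, PySem.Dict.contains_mk, e1, e2, e3, e4, e5]
    simp [pvSources, hc]

lemma mem_pvVariants_aux (cs : List Char) :
    ∀ (acc : List (List Char)) (v t : List Char), v ∈ acc → t.map pvF = cs →
      (v ++ t) ∈ cs.foldl (fun vs c => vs.flatMap (fun v => (pvSources c).map (fun s => v ++ [s]))) acc := by
  induction cs with
  | nil =>
    intro acc v t hv ht
    rw [List.map_eq_nil_iff] at ht
    subst ht; simpa using hv
  | cons c cs ih =>
    intro acc v t hv ht
    cases t with
    | nil => simp at ht
    | cons x t' =>
      rw [List.map_cons, List.cons.injEq] at ht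
      obtain ⟨hx, ht'⟩ := ht
      have hstep : v ++ [x] ∈ acc.flatMap (fun v => (pvSources c).map (fun s => v ++ [s])) := by
        rw [List.mem_flatMap]
        exact ⟨v, hv, List.mem_map.mpr ⟨x, mem_pvSources_of c x hx, rfl⟩⟩
      have := ih _ (v ++ [x]) t' hstep ht'
      simpa [List.foldl_cons, List.append_assoc] using this

lemma mem_pvVariants_of_map (b xs : List Char) (h : xs.map pvF = b) : xs ∈ pvVariants b := by
  have := mem_pvVariants_aux b [[]] [] xs (by simp) h
  simpa [pvVariants] using this

set_option maxRecDepth 200000 in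
lemma pvSpoofs_sound : ∀ p ∈ pvSpoofs.items, p.1.map pvF = p.2 ∧ p.1 ≠ p.2 ∧ p.2 ∈ pvTargetBrands := by decide

set_option maxRecDepth 200000 in
lemma pvSpoofs_complete : ∀ b ∈ pvTargetBrands, ∀ v ∈ pvVariants b, v ≠ b → pvSpoofs.get? v = some b := by decide

lemma pvBrands_nodup : pvTargetBrands.Nodup := by decide

lemma pvFindSpoof_none (part std : List Char) :
    ∀ bs : List (List Char), (∀ b ∈ bs, ¬(std = b ∧ part ≠ b)) → pvFindSpoof part std bs = none := by
  intro bs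
  induction bs with
  | nil => intro _; rfl
  | cons b rest ih =>
    intro h
    have hb := h b (by simp)
    have : (std == b && part != b) = false := by
      rcases eq_or_ne std b with h1 | h1
      · rcases eq_or_ne part b with h2 | h2
        · simp [h2]
        · exact absurd ⟨h1, h2⟩ hb
      · simp [beq_eq_false_iff_ne.mpr h1]
    simp only [pvFindSpoof, this, Bool.false_eq_true, if_false]
    exact ih (fun b' hb' => h b' (List.mem_cons_of_mem _ hb'))

lemma pvFindSpoof_some (part std b : List Char) :
    ∀ bs : List (List Char), bs.Nodup → b ∈ bs → std = b → part ≠ b →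
      pvFindSpoof part std bs = some b := by
  intro bs
  induction bs with
  | nil => intro _ h; cases h
  | cons b0 rest ih =>
    intro hnd hmem hstd hne
    rcases List.mem_cons.mp hmem with rfl | hmem'
    · simp [pvFindSpoof, hstd, hne]
    · have hb0 : b0 ≠ b := fun h => (List.nodup_cons.mp hnd).1 (h ▸ hmem')
      have : (std == b0) = false := by
        rw [hstd]; exact beq_eq_false_iff_ne.mpr (Ne.symm hb0)
      simp only [pvFindSpoof, this, Bool.false_and, Bool.false_eq_true, if_false]
      exact ih (List.nodup_cons.mp hnd).2 hmem' hstd hne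

-- the heart of the equivalence: A's inner brand scan = B's spoof-dict lookup
lemma pvFindSpoof_eq_get (p : List Char) :
    pvFindSpoof p (pvStandardize p) pvTargetBrands = pvSpoofs.get? p := by
  cases h : pvSpoofs.get? p with
  | none =>
    apply pvFindSpoof_none
    rintro b hb ⟨hstd, hne⟩
    rw [pvStandardize_eq_map] at hstd
    have hv := mem_pvVariants_of_map b p hstd
    have := pvSpoofs_complete b hb p hv hne
    rw [h] at this; cases this
  | some b =>
    have hmem := PySem.Dict.mem_items_of_get?_eq_some pvSpoofs h
    obtain ⟨hmap, hne, hbmem⟩ := pvSpoofs_sound (p, b) hmem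
    exact pvFindSpoof_some p _ b pvTargetBrands pvBrands_nodup hbmem
      (by rw [pvStandardize_eq_map]; exact hmap) hne

lemma pvLoop_eq : ∀ ps : List (List Char), pvALoop ps = pvBLoop ps := by
  intro ps
  induction ps with
  | nil => rfl
  | cons p rest ih =>
    show (if pvTargetBrands.contains p then pvALoop rest
          else match pvFindSpoof p (pvStandardize p) pvTargetBrands with
               | some b => (true, some (String.ofList b))
               | none => pvALoop rest)
       = (if pvTargetBrands.contains p then pvBLoop rest
          else match pvSpoofs.get? p with
               | some b => (true, some (String.ofList b))
               | none => pvBLoop rest)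
    rw [pvFindSpoof_eq_get p]
    by_cases hc : pvTargetBrands.contains p = true
    · rw [if_pos hc, if_pos hc, ih]
    · have hc' : ¬(pvTargetBrands.contains p = true) := hc
      rw [if_neg hc', if_neg hc']
      cases pvSpoofs.get? p with
      | none => exact ih
      | some b => rfl

-- ===== VERDICT (by name: the statement is the Claim_ definition above) =====
theorem check_for_brand_spoofing_spec : Claim_equal_check_for_brand_spoofing := by
  intro url _
  show check_for_brand_spoofing url = check_for_brand_spoofing_alt url
  unfold check_for_brand_spoofing check_for_brand_spoofing_alt
  exact pvLoop_eq _
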